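-- pv_equiv track=rewrite | github.com/EstamelGG/EveSDE | station_name_localization/station_template_generator.py | generate_word_combinations
-- ===== SOURCE A (Python) =====
-- from typing import Dict, List, Tuple, Optional
--
-- def generate_word_combinations(text: str) -> List[str]:
--     """生成给定文本的所有可能词组组合"""
--     words = text.split()
--     combinations = []
--
--     # 生成所有可能的连续词组
--     for i in range(len(words)):
--         for j in range(i + 1, len(words) + 1):
--             combination = ' '.join(words[i:j])
--             combinations.append(combination)
--
--     # 按长度降序排序，这样我们会先匹配最长的词组
--     combinations.sort(key=len, reverse=True)
--     return combinations
-- ===== SOURCE B (Python) =====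
-- def generate_word_combinations(text: str):
--     """Bucket the contiguous word groups by character length and emit the
--     buckets from longest to shortest: a counting/bucket sort replaces the
--     comparison sort, and ties keep the generation order automatically."""
--     words = text.split()
--     n = len(words)
--     buckets = {}
--     for i in range(n):
--         for j in range(i + 1, n + 1):
--             s = ' '.join(words[i:j])
--             buckets.setdefault(len(s), []).append(s)
--     out = []
--     for L in sorted(buckets, reverse=True):
--         out += buckets[L]
--     return out
-- ===== Notes on version B (the rewrite author's own statement) =====
-- stated objective: alternative
-- what changed: B replaces A's comparison sort (sort by len, reverse=True) by bucketing the generated word-group substrings into a dict keyed by character length and emitting the buckets from longest to shortest, which reproduces the stable reverse sort (ties keep generation order) with no sort over the substrings.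
import Mathlib
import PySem

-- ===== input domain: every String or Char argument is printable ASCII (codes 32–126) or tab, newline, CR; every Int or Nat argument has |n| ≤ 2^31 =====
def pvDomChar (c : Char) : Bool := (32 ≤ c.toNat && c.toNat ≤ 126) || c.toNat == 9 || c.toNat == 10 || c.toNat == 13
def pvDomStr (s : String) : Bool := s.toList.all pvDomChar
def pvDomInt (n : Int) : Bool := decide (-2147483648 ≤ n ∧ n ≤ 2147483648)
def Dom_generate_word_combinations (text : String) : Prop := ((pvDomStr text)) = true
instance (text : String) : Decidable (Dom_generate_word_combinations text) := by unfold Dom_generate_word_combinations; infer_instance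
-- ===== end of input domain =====

-- B replaces A's comparison sort (key=len, reverse=True) by grouping the word-group
-- substrings into length buckets and emitting the buckets longest-first (objective: alternative).

-- ===== PORT A =====
def generate_word_combinations (text : String) : List String :=
  let words := PySem.Str.split₀ text
  let combinations : List String :=
    (PySem.List.pyRange 0 (words.length : Int) 1).foldl (fun acc i =>
      (PySem.List.pyRange (i + 1) ((words.length : Int) + 1) 1).foldl (fun acc j =>
        acc ++ [PySem.Str.join " " (PySem.List.slice words (some i) (some j))]) acc) []
  PySem.List.sorted combinations PySem.Str.len true

-- ===== PORT B =====
def generate_word_combinations_alt (text : String) : List String :=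
  let words := PySem.Str.split₀ text
  let n : Int := (words.length : Int)
  let buckets : PySem.Dict Int (List String) :=
    (PySem.List.pyRange 0 n 1).foldl (fun d i =>
      (PySem.List.pyRange (i + 1) (n + 1) 1).foldl (fun d j =>
        let s := PySem.Str.join " " (PySem.List.slice words (some i) (some j))
        d.modify (PySem.Str.len s) [] (· ++ [s])) d) PySem.Dict.empty
  -- 'buckets[L]' never raises: L ranges over buckets' keys, so getD is exact here
  (PySem.List.sorted buckets.keys (fun k => k) true).foldl (fun out L => out ++ buckets.getD L []) []

-- ===== PRECONDITION & SPEC =====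
def Spec_generate_word_combinations (text : String) (out : List String) : Prop := out = generate_word_combinations_alt text
instance (text : String) (out : List String) : Decidable (Spec_generate_word_combinations text out) := by unfold Spec_generate_word_combinations; infer_instance

-- ===== CLAIM (what is proved, stated in full; the proofs are below) =====
def Claim_equal_generate_word_combinations : Prop := ∀ (text : String), Dom_generate_word_combinations text → Spec_generate_word_combinations text (generate_word_combinations text)

-- ===== LEMMAS AND PROOFS =====

-- the common list of word-group substrings, in A's generation order
def pvCombos (words : List String) : List String :=
  (PySem.List.pyRange 0 (words.length : Int) 1).flatMap (fun i =>
    (PySem.List.pyRange (i + 1) ((words.length : Int) + 1) 1).map (fun j =>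
      PySem.Str.join " " (PySem.List.slice words (some i) (some j))))

theorem pvInsertBy_append_left {α : Type} (bf : α → α → Bool) (x : α) (l1 l2 : List α)
    (h : ∀ y ∈ l1, bf x y = false) :
    PySem.List.insertBy bf x (l1 ++ l2) = l1 ++ PySem.List.insertBy bf x l2 := by
  induction l1 with
  | nil => simp
  | cons a t ih =>
    simp [PySem.List.insertBy, h a (by simp), ih (fun y hy => h y (by simp [hy]))]

theorem pvInsert_buckets {α : Type} (key : α → Int) (x : α) (ks : List Int) (pref : List α)
    (hp : ks.Pairwise (· > ·)) (hm : key x ∈ ks) :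
    PySem.List.insertBy (fun a b => decide (key b < key a)) x
      (ks.flatMap (fun k => pref.filter (fun y => key y == k)))
    = ks.flatMap (fun k => (pref ++ [x]).filter (fun y => key y == k)) := by
  induction ks with
  | nil => simp at hm
  | cons k ks ih =>
    have hgt : ∀ k' ∈ ks, k' < k := (List.pairwise_cons.1 hp).1
    have hp' := (List.pairwise_cons.1 hp).2
    by_cases hk : key x = k
    · have htail : ks.flatMap (fun k' => (pref ++ [x]).filter (fun y => key y == k'))
          = ks.flatMap (fun k' => pref.filter (fun y => key y == k')) := by
        apply List.flatMap_congr
        intro k' hk'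
        have : ¬ (key x = k') := by
          have := hgt k' hk'; omega
        simp [List.filter_append, this]
      have hhead : (pref ++ [x]).filter (fun y => key y == k)
          = pref.filter (fun y => key y == k) ++ [x] := by
        simp [List.filter_append, hk]
      rw [List.flatMap_cons, List.flatMap_cons, hhead, htail]
      rw [pvInsertBy_append_left _ x _ _ (by
        intro y hy
        have : key y = k := by simpa using (List.of_mem_filter hy)
        simp [this, hk])]
      rw [List.append_assoc]
      congr 1
      -- insertBy into the (all-smaller-key) tail prepends
      rcases htl : ks.flatMap (fun k' => pref.filter (fun y => key y == k')) with _ | ⟨z, rest⟩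
      · simp [PySem.List.insertBy]
      · have hz : ∃ k' ∈ ks, key z = k' := by
          have : z ∈ ks.flatMap (fun k' => pref.filter (fun y => key y == k')) := by
            rw [htl]; simp
          rcases List.mem_flatMap.1 this with ⟨k', hk', hzf⟩
          exact ⟨k', hk', by simpa using (List.of_mem_filter hzf)⟩
        rcases hz with ⟨k', hk', hzk⟩
        have : key z < key x := by have := hgt k' hk'; omega
        simp [PySem.List.insertBy, this]
    · have hm' : key x ∈ ks := by
        rcases List.mem_cons.1 hm with h | h
        · exact absurd h hk
        · exact h
      have hhead : (pref ++ [x]).filter (fun y => key y == k)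
          = pref.filter (fun y => key y == k) := by
        simp [List.filter_append, hk]
      rw [List.flatMap_cons, List.flatMap_cons, hhead]
      rw [pvInsertBy_append_left _ x _ _ (by
        intro y hy
        have hyk : key y = k := by simpa using (List.of_mem_filter hy)
        have : key x < k := by have := hgt _ hm'; omega
        simp [hyk]; omega)]
      rw [ih hp' hm']

theorem pvSorted_rev_buckets {α : Type} (cs : List α) (key : α → Int) (ks : List Int)
    (hp : ks.Pairwise (· > ·)) (hm : ∀ x ∈ cs, key x ∈ ks) :
    PySem.List.sorted cs key true = ks.flatMap (fun k => cs.filter (fun y => key y == k)) := by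
  rw [PySem.List.sorted_rev_eq_foldl_insertBy]
  induction cs using List.reverseRecOn with
  | nil => simp
  | append_singleton t x ih =>
    rw [List.foldl_append, List.foldl_cons, List.foldl_nil]
    rw [ih (fun y hy => hm y (by simp [hy]))]
    exact pvInsert_buckets key x ks t hp (hm x (by simp))

theorem generate_word_combinations_spec : Claim_equal_generate_word_combinations := by
  intro text _
  unfold Spec_generate_word_combinations generate_word_combinations generate_word_combinations_alt
  dsimp only
  set words := PySem.Str.split₀ text with hw
  -- A's generated list, in generation order
  have hA : ((PySem.List.pyRange 0 (words.length : Int) 1).foldl (fun acc i =>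
      (PySem.List.pyRange (i + 1) ((words.length : Int) + 1) 1).foldl (fun acc j =>
        acc ++ [PySem.Str.join " " (PySem.List.slice words (some i) (some j))]) acc) [])
      = pvCombos words := by
    unfold pvCombos
    simp only [PySem.List.foldl_append_singleton_eq_map, PySem.List.foldl_append_eq_flatMap,
      List.nil_append]
  set cs := pvCombos words with hcs
  set dstep : PySem.Dict Int (List String) → String → PySem.Dict Int (List String) :=
    fun d s => d.modify (PySem.Str.len s) [] (· ++ [s]) with hdstep
  -- B's bucket dict is the fold of dstep over the same generated list
  have hB : ((PySem.List.pyRange 0 (words.length : Int) 1).foldl (fun d i =>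
      (PySem.List.pyRange (i + 1) ((words.length : Int) + 1) 1).foldl (fun d j =>
        let s := PySem.Str.join " " (PySem.List.slice words (some i) (some j))
        d.modify (PySem.Str.len s) [] (· ++ [s])) d) PySem.Dict.empty)
      = cs.foldl dstep PySem.Dict.empty := by
    rw [hcs]; unfold pvCombos
    rw [List.foldl_flatMap]
    simp only [List.foldl_map]
    rfl
  set d : PySem.Dict Int (List String) := cs.foldl dstep PySem.Dict.empty with hd
  have hkeys : d.keys = PySem.Set.ofList (cs.map PySem.Str.len) := by
    rw [hd, hdstep]
    rw [PySem.Dict.keys_foldl_modify_key cs PySem.Str.len [] (fun _ x v => v ++ [x])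
      PySem.Dict.empty]
    rw [PySem.Dict.keys_empty, PySem.Set.ofList_eq_foldl]
    rfl
  have hgetD : ∀ c : Int, d.getD c [] = cs.filter (fun s => PySem.Str.len s == c) := by
    intro c
    have hmapfold : d = (cs.map (fun s => (PySem.Str.len s, s))).foldl
        (fun d p => d.modify p.1 [] (· ++ [p.2])) PySem.Dict.empty := by
      rw [List.foldl_map]
    rw [hmapfold, PySem.Dict.getD_foldl_modify_append, List.filter_map]
    simp [Function.comp_def]
  set ks : List Int := PySem.List.sorted d.keys (fun k => k) true with hks
  have hksnd : ks.Nodup := by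
    refine (PySem.List.sorted_perm d.keys (fun k => k) true).symm.nodup ?_
    rw [hkeys]; exact PySem.Set.nodup_ofList _
  have hksp : ks.Pairwise (· > ·) := by
    have h1 := PySem.List.sorted_pairwise_rev d.keys (fun k => k)
    exact (h1.and hksnd).imp (fun h => lt_of_le_of_ne h.1 (fun e => h.2 e.symm))
  have hmem : ∀ x ∈ cs, PySem.Str.len x ∈ ks := by
    intro x hx
    rw [hks, PySem.List.mem_sorted, hkeys, PySem.Set.mem_ofList]
    exact List.mem_map_of_mem hx
  rw [hA, hB, PySem.List.foldl_append_eq_flatMap, List.nil_append]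
  rw [pvSorted_rev_buckets cs PySem.Str.len ks hksp hmem]
  exact List.flatMap_congr (fun k _ => (hgetD k).symm)
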